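-- pv_equiv track=rewrite | github.com/LaunchlabAU/auspol-donations-twitter-bot | donationsbot/functions/bot/bot/twitter.py | get_handles_from_tweet
-- ===== SOURCE A (Python) =====
-- from typing import List, Tuple
--
-- EXCLUDE_HANDLES = [
--     h.lower()
--     for h in ["@AusPolDonations", "#auspol", "#DonationsReform", "@SomeCompany"]
-- ]
--
-- def get_handles_from_tweet(tweet: str) -> Tuple[List[str], List[str]]:
--     handles = [word.lower() for word in tweet.split() if word.startswith(("@", "#"))]
--     filtered_handles = [handle for handle in handles if handle not in EXCLUDE_HANDLES]
--     # hash tags to add back into response, but not use in lookup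
--     add_hashtags = [
--         handle
--         for handle in handles
--         if handle in EXCLUDE_HANDLES and handle.startswith("#")
--     ]
--     return filtered_handles, add_hashtags
-- ===== SOURCE B (Python) =====
-- from typing import List, Tuple
--
-- EXCLUDE_HANDLES = [
--     h.lower()
--     for h in ["@AusPolDonations", "#auspol", "#DonationsReform", "@SomeCompany"]
-- ]
--
-- def get_handles_from_tweet(tweet: str) -> Tuple[List[str], List[str]]:
--     # character-level state machine: no split(), no comprehensions; tokens are
--     # built char by char and classified once at each whitespace boundary
--     filtered_handles: List[str] = []
--     add_hashtags: List[str] = []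
--     token = ""
--     for ch in tweet + " ":
--         if ch.isspace():
--             if token and token[0] in "@#":
--                 handle = token.lower()
--                 if handle in EXCLUDE_HANDLES:
--                     if handle.startswith("#"):
--                         add_hashtags.append(handle)
--                 else:
--                     filtered_handles.append(handle)
--             token = ""
--         else:
--             token += ch
--     return filtered_handles, add_hashtags
-- ===== Notes on version B (the rewrite author's own statement) =====
-- stated objective: alternative
-- what changed: Replaces A's split() plus three list comprehensions (build handles, filter, re-filter) with a character-level tokenizer state machine: one scan over the characters that builds each token incrementally and classifies it once at each whitespace boundary.
import Mathlib
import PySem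

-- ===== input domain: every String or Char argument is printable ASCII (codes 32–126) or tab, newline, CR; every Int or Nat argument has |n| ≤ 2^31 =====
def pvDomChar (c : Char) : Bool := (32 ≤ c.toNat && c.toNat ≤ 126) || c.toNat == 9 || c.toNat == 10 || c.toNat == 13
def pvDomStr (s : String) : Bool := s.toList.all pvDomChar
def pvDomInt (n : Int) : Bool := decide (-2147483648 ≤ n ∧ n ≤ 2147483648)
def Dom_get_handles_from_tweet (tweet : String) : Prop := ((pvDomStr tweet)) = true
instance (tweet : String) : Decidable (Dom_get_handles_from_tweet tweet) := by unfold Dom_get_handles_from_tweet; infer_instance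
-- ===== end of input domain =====

-- B replaces A's split() + three comprehensions by a character-level tokenizer state machine
-- that classifies each token once at a whitespace boundary; objective: alternative, same cost.

-- ===== PORT A =====
def EXCLUDE_HANDLES : List String :=
  (["@AusPolDonations", "#auspol", "#DonationsReform", "@SomeCompany"]).map PySem.Str.lower

def get_handles_from_tweet (tweet : String) : List String × List String :=
  let handles := ((PySem.Str.split₀ tweet).filter
      (fun word => PySem.Str.startswith word "@" || PySem.Str.startswith word "#")).map PySem.Str.lower
  let filtered_handles := handles.filter (fun handle => !(EXCLUDE_HANDLES.contains handle))
  let add_hashtags := handles.filter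
      (fun handle => EXCLUDE_HANDLES.contains handle && PySem.Str.startswith handle "#")
  (filtered_handles, add_hashtags)

-- ===== PORT B =====
-- 'if token and token[0] in "@#": …' — the body of Source B's whitespace branch
def flushToken (token : List Char) (filtered adds : List String) : List String × List String :=
  match token with
  | [] => (filtered, adds)
  | t0 :: _ =>
    if t0 = '@' || t0 = '#' then
      let handle := PySem.Str.lower (String.ofList token)
      if EXCLUDE_HANDLES.contains handle then
        if PySem.Str.startswith handle "#" then (filtered, adds ++ [handle])
        else (filtered, adds)
      else (filtered ++ [handle], adds)
    else (filtered, adds)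

-- the for-loop of Source B: state = (token, filtered, adds)
def scanChars : List Char → List Char → List String → List String → List String × List String
  | [], _token, filtered, adds => (filtered, adds)
  | c :: cs, token, filtered, adds =>
    if PySem.Chars.isspace c then
      match flushToken token filtered adds with
      | (f, a) => scanChars cs [] f a
    else scanChars cs (token ++ [c]) filtered adds

def get_handles_from_tweet_alt (tweet : String) : List String × List String :=
  scanChars (tweet.toList ++ [' ']) [] [] []

-- ===== PRECONDITION & SPEC =====
def Spec_get_handles_from_tweet (tweet : String) (out : List String × List String) : Prop := out = get_handles_from_tweet_alt tweet
instance (tweet : String) (out : List String × List String) : Decidable (Spec_get_handles_from_tweet tweet out) := by unfold Spec_get_handles_from_tweet; infer_instance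

-- ===== CLAIM (what is proved, stated in full; the proofs are below) =====
def Claim_equal_get_handles_from_tweet : Prop := ∀ (tweet : String), Dom_get_handles_from_tweet tweet → Spec_get_handles_from_tweet tweet (get_handles_from_tweet tweet)

-- ===== LEMMAS AND PROOFS =====

-- word-by-word classification (proof-only abstraction of B's flushes)
def classifyWords : List (List Char) → List String → List String → List String × List String
  | [], f, a => (f, a)
  | w :: ws, f, a => classifyWords ws (flushToken w f a).1 (flushToken w f a).2

theorem go_acc (cs : List Char) (cur : List Char) (acc : List (List Char)) :
    PySem.Chars.split₀.go cs cur acc = acc.reverse ++ PySem.Chars.split₀.go cs cur [] := by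
  induction cs generalizing cur acc with
  | nil =>
    simp only [PySem.Chars.split₀.go]
    split_ifs <;> simp
  | cons c cs ih =>
    simp only [PySem.Chars.split₀.go]
    split_ifs with hs he
    · exact ih [] acc
    · rw [ih [] (cur.reverse :: acc), ih [] [cur.reverse]]
      simp
    · exact ih (c :: cur) acc

theorem scan_go (cs : List Char) (token : List Char) (f a : List String) :
    scanChars (cs ++ [' ']) token f a =
      classifyWords (PySem.Chars.split₀.go cs token.reverse []) f a := by
  induction cs generalizing token f a with
  | nil =>
    simp only [List.nil_append, scanChars, PySem.Chars.split₀.go]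
    rw [show PySem.Chars.isspace ' ' = true from rfl]
    cases token with
    | nil => simp [flushToken, classifyWords]
    | cons t0 ts =>
      simp only [if_true, List.reverse_cons]
      rw [show ((ts.reverse ++ [t0]).isEmpty) = false from by simp]
      simp [classifyWords]
  | cons c cs ih =>
    simp only [List.cons_append, scanChars, PySem.Chars.split₀.go]
    by_cases hs : PySem.Chars.isspace c = true
    · rw [hs]
      simp only [if_true]
      cases token with
      | nil =>
        simp only [List.reverse_nil, List.isEmpty_nil, if_true]
        cases hft : flushToken [] f a with
        | mk f' a' =>
          simp only [flushToken] at hft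
          cases hft
          exact ih [] f a
      | cons t0 ts =>
        simp only [List.reverse_cons]
        rw [show ((ts.reverse ++ [t0]).isEmpty) = false from by simp]
        simp only [Bool.false_eq_true, if_false, List.reverse_append, List.reverse_reverse,
          List.reverse_singleton, List.singleton_append]
        rw [go_acc cs [] [t0 :: ts]]
        simp only [List.reverse_singleton, List.singleton_append]
        rw [show classifyWords ((t0 :: ts) :: PySem.Chars.split₀.go cs [] []) f a
              = classifyWords (PySem.Chars.split₀.go cs [] [])
                  (flushToken (t0 :: ts) f a).1 (flushToken (t0 :: ts) f a).2 from rfl]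
        exact ih [] _ _
    · simp only [hs, if_false, Bool.false_eq_true]
      rw [ih (token ++ [c]) f a]
      simp

theorem startswith_ofList (w : List Char) (c : Char) :
    PySem.Str.startswith (String.ofList w) (String.ofList [c]) =
      match w with | [] => false | t0 :: _ => (t0 == c) := by
  cases w <;> simp [PySem.Str.startswith, PySem.Chars.startswith, List.isPrefixOf, eq_comm]

theorem classify_eq (ws : List (List Char)) (f a : List String) :
    classifyWords ws f a =
      (f ++ (((ws.map String.ofList).filter
            (fun word => PySem.Str.startswith word "@" || PySem.Str.startswith word "#")).map PySem.Str.lower).filter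
          (fun h => !(EXCLUDE_HANDLES.contains h)),
       a ++ (((ws.map String.ofList).filter
            (fun word => PySem.Str.startswith word "@" || PySem.Str.startswith word "#")).map PySem.Str.lower).filter
          (fun h => EXCLUDE_HANDLES.contains h && PySem.Str.startswith h "#")) := by
  induction ws generalizing f a with
  | nil => simp [classifyWords]
  | cons w ws ih =>
    simp only [classifyWords, ih, List.map_cons, List.filter_cons]
    rw [show ("@" : String) = String.ofList ['@'] from rfl,
        show ("#" : String) = String.ofList ['#'] from rfl]
    cases w with
    | nil =>
      simp [flushToken, PySem.Chars.startswith]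
    | cons t0 ts =>
      rw [startswith_ofList (t0 :: ts) '@', startswith_ofList (t0 :: ts) '#']
      simp only [flushToken]
      by_cases hat : t0 = '@' <;> by_cases hsh : t0 = '#' <;>
        simp only [hat, hsh] <;>
        split_ifs <;>
        simp_all [List.append_assoc]

-- ===== VERDICT (by name: the statement is the Claim_ definition above) =====
theorem get_handles_from_tweet_spec : Claim_equal_get_handles_from_tweet := by
  intro tweet _
  unfold Spec_get_handles_from_tweet get_handles_from_tweet get_handles_from_tweet_alt
  rw [scan_go tweet.toList [] [] []]
  simp only [List.reverse_nil]
  rw [show PySem.Chars.split₀.go tweet.toList [] []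
        = PySem.Chars.split₀ tweet.toList from rfl]
  rw [classify_eq]
  simp [PySem.Str.split₀]
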